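-- pv_equiv track=rewrite | github.com/Marfung37/ExtendedSfinderPieces | pieces.py | handleBeforeOperator
-- ===== SOURCE A (Python) =====
-- def handleBeforeOperator(beforePieces, afterPieces, queue):
--     '''Handle the before operator'''
--     beforePieces = list(beforePieces)
--
--     # tries to match all the pieces in beforePieces before seeing any of the after pieces
--     for piece in queue:
--         # check if it's an after piece
--         if piece in afterPieces:
--             # hit a after piece before getting through all the before pieces
--             return False
--         # check if it's a before piece
--         elif piece in beforePieces:
--             # remove this piece from the before pieces
--             beforePieces.remove(piece)
--
--             # if beforePieces is empty
--             if not beforePieces: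
--                 return True
--
--     # if gone through the whole queue and still not sure, then assume False
--     return False
-- ===== SOURCE B (Python) =====
-- def handleBeforeOperator(beforePieces, afterPieces, queue):
--     '''Handle the before operator'''
--     # multiset of needed pieces
--     need = {}
--     for p in beforePieces:
--         need[p] = need.get(p, 0) + 1
--     if not need:
--         return False
--     # count pieces in the queue prefix before the first after-piece
--     prefix_count = {}
--     for p in queue:
--         if p in afterPieces:
--             break
--         prefix_count[p] = prefix_count.get(p, 0) + 1
--     # all needed pieces must occur (with multiplicity) in that prefix
--     return all(prefix_count.get(p, 0) >= c for p, c in need.items())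
-- ===== Notes on version B (the rewrite author's own statement) =====
-- stated objective: alternative
-- what changed: Replaces A's mutate-a-copy-and-early-exit scan (list.remove inside the loop, return at the moment the list empties) by: build a Counter of beforePieces, count the queue prefix before the first after-piece, and decide by a single multiset-containment comparison.
import Mathlib
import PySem

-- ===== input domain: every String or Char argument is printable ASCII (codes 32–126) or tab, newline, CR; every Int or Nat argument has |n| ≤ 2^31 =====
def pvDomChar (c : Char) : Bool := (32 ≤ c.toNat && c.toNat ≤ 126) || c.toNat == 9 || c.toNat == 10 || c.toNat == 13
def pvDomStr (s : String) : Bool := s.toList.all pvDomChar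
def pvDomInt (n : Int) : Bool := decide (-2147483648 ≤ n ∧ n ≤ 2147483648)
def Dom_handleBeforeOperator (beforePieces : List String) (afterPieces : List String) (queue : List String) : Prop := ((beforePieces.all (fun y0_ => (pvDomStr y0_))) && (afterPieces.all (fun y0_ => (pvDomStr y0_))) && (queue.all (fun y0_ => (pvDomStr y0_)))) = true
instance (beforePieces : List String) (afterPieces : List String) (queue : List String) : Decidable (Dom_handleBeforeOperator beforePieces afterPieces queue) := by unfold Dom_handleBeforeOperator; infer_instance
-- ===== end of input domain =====

-- B replaces A's destructive scan (remove from a copy of beforePieces, early return) by a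
-- Counter of beforePieces compared against a count of the queue prefix before the first
-- after-piece: a different decomposition of the same task (no speed claim).

-- ===== PORT A =====
-- the 'for piece in queue' loop of A, with the mutable copy of beforePieces as state
def pvGoA (afterPieces : List String) (bp : List String) : List String → Bool
  | [] => false
  | piece :: rest =>
    if afterPieces.contains piece then false
    else if bp.contains piece then
      -- beforePieces.remove(piece): cannot raise here since 'piece in beforePieces' just held
      let bp' := (PySem.List.remove? bp piece).getD bp
      if bp'.isEmpty then true else pvGoA afterPieces bp' rest
    else pvGoA afterPieces bp rest

def handleBeforeOperator (beforePieces : List String) (afterPieces : List String) (queue : List String) : Bool :=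
  pvGoA afterPieces beforePieces queue

-- ===== PORT B =====
def handleBeforeOperator_alt (beforePieces : List String) (afterPieces : List String) (queue : List String) : Bool :=
  let need := beforePieces.foldl (fun d p => d.insert p (d.getD p 0 + 1)) (PySem.Dict.empty : PySem.Dict String Int)
  if need.size = 0 then false
  else
    let prefixq := queue.takeWhile (fun p => !(afterPieces.contains p))
    let prefixCount := prefixq.foldl (fun d p => d.insert p (d.getD p 0 + 1)) (PySem.Dict.empty : PySem.Dict String Int)
    need.items.all (fun pc => prefixCount.getD pc.1 0 ≥ pc.2)

-- ===== PRECONDITION & SPEC =====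
def Spec_handleBeforeOperator (beforePieces : List String) (afterPieces : List String) (queue : List String) (out : Bool) : Prop := out = handleBeforeOperator_alt beforePieces afterPieces queue
instance (beforePieces : List String) (afterPieces : List String) (queue : List String) (out : Bool) : Decidable (Spec_handleBeforeOperator beforePieces afterPieces queue out) := by unfold Spec_handleBeforeOperator; infer_instance

-- ===== CLAIM (what is proved, stated in full; the proofs are below) =====
def Claim_equal_handleBeforeOperator : Prop := ∀ (beforePieces : List String) (afterPieces : List String) (queue : List String), Dom_handleBeforeOperator beforePieces afterPieces queue → Spec_handleBeforeOperator beforePieces afterPieces queue (handleBeforeOperator beforePieces afterPieces queue)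

-- ===== LEMMAS AND PROOFS =====

theorem pv_count_cons_ne (x s : String) (l : List String) (hs : s ≠ x) :
    (x :: l).count s = l.count s := by
  simp [Ne.symm hs]

-- a nonempty list cannot have all its counts ≤ the counts of the empty prefix
theorem pv_count_nil_contra (bp : List String)
    (hne : bp ≠ []) (hcnt : ∀ s : String, bp.count s ≤ (List.nil (α := String)).count s) : False := by
  cases bp with
  | nil => exact absurd rfl hne
  | cons x t =>
    have := hcnt x
    simp [List.count_cons_self] at this

-- A's loop returns true iff beforePieces is nonempty and every piece occurs in the queue
-- prefix before the first after-piece at least as often as in beforePieces.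
theorem pvGoA_char (ap : List String) (queue : List String) : ∀ (bp : List String),
    (pvGoA ap bp queue = true ↔
      bp ≠ [] ∧ ∀ s : String, bp.count s ≤ (queue.takeWhile (fun p => !(ap.contains p))).count s) := by
  induction queue with
  | nil =>
    intro bp
    simp only [pvGoA, List.takeWhile_nil]
    constructor
    · intro h; exact absurd h (by simp)
    · rintro ⟨hne, hcnt⟩; exact (pv_count_nil_contra bp hne hcnt).elim
  | cons piece rest ih =>
    intro bp
    by_cases ha : ap.contains piece = true
    · rw [List.takeWhile_cons, ha]
      simp only [pvGoA, ha, if_true, Bool.not_true, Bool.false_eq_true, if_false]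
      constructor
      · intro h; exact absurd h (by simp)
      · rintro ⟨hne, hcnt⟩; exact (pv_count_nil_contra bp hne hcnt).elim
    · have ha' : ap.contains piece = false := by simpa using ha
      rw [List.takeWhile_cons, ha']
      simp only [Bool.not_false, if_true]
      by_cases hb : bp.contains piece = true
      · have hmem : piece ∈ bp := by simpa using hb
        have hrem : (PySem.List.remove? bp piece).getD bp = bp.erase piece := by
          rw [PySem.List.remove?_eq_some_erase bp piece hmem]; rfl
        simp only [pvGoA, ha', Bool.false_eq_true, if_false, hb, if_true, hrem]
        have hbne : bp ≠ [] := by rintro rfl; cases hmem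
        have hpos : 1 ≤ bp.count piece := List.one_le_count_iff.mpr hmem
        have hcself : (bp.erase piece).count piece = bp.count piece - 1 := by
          simp [List.count_erase_self]
        have hcne : ∀ s : String, s ≠ piece → (bp.erase piece).count s = bp.count s := by
          intro s hs
          exact List.count_erase_of_ne (by simpa [eq_comm] using hs)
        by_cases he : (bp.erase piece).isEmpty = true
        · have hnil : bp.erase piece = [] := by simpa [List.isEmpty_iff] using he
          simp only [he, if_true, true_iff]
          refine ⟨hbne, ?_⟩
          intro s
          by_cases hs : s = piece
          · subst hs
            rw [hnil, List.count_nil] at hcself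
            rw [List.count_cons_self]
            omega
          · have h0 := hcne s hs
            rw [hnil, List.count_nil] at h0
            rw [pv_count_cons_ne piece s _ hs]
            omega
        · have he' : bp.erase piece ≠ [] := by simpa [List.isEmpty_iff] using he
          simp only [he, Bool.false_eq_true, if_false, ih]
          constructor
          · rintro ⟨-, hcnt⟩
            refine ⟨hbne, ?_⟩
            intro s
            have h1 := hcnt s
            by_cases hs : s = piece
            · subst hs
              rw [List.count_cons_self]
              omega
            · rw [hcne s hs] at h1
              rw [pv_count_cons_ne piece s _ hs]
              omega
          · rintro ⟨-, hcnt⟩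
            refine ⟨he', ?_⟩
            intro s
            have h1 := hcnt s
            by_cases hs : s = piece
            · subst hs
              rw [List.count_cons_self] at h1
              omega
            · rw [pv_count_cons_ne piece s _ hs] at h1
              rw [hcne s hs]
              omega
      · have hb' : bp.contains piece = false := by simpa using hb
        have hnmem : piece ∉ bp := by simpa using hb
        simp only [pvGoA, ha', Bool.false_eq_true, if_false, hb', ih]
        constructor
        · rintro ⟨hne, hcnt⟩
          refine ⟨hne, ?_⟩
          intro s
          have h1 := hcnt s
          rw [List.count_cons]
          omega
        · rintro ⟨hne, hcnt⟩
          refine ⟨hne, ?_⟩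
          intro s
          have h1 := hcnt s
          by_cases hs : s = piece
          · subst hs
            have h0 : bp.count s = 0 := List.count_eq_zero.mpr hnmem
            omega
          · rw [pv_count_cons_ne piece s _ hs] at h1
            omega

-- B returns the same truth value, via the Counter lemmas.
theorem alt_char (bp ap queue : List String) :
    (handleBeforeOperator_alt bp ap queue = true ↔
      bp ≠ [] ∧ ∀ s : String, bp.count s ≤ (queue.takeWhile (fun p => !(ap.contains p))).count s) := by
  simp only [handleBeforeOperator_alt, PySem.Dict.foldl_insert_getD_add_one_eq_counter]
  have hsize : (PySem.Dict.counter bp : PySem.Dict String Int).size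
      = (PySem.Set.ofList bp).length := by
    simp [PySem.Dict.size, PySem.Dict.items_counter]
  by_cases hnil : bp = []
  · subst hnil
    simp [hsize, PySem.Set.ofList]
  · have hset : (PySem.Set.ofList bp : List String) ≠ [] := by
      cases bp with
      | nil => exact absurd rfl hnil
      | cons x t => simp [PySem.Set.ofList_cons]
    have hsz : ¬ (PySem.Dict.counter bp : PySem.Dict String Int).size = 0 := by
      rw [hsize]; simpa [List.length_eq_zero_iff] using hset
    rw [if_neg hsz, PySem.Dict.items_counter]
    simp only [List.all_map, List.all_eq_true, Function.comp, PySem.Dict.getD_counter,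
      ge_iff_le, decide_eq_true_eq]
    constructor
    · intro h
      refine ⟨hnil, ?_⟩
      intro s
      by_cases hm : s ∈ bp
      · exact_mod_cast h s (by simpa [PySem.Set.mem_ofList] using hm)
      · have : bp.count s = 0 := List.count_eq_zero.mpr hm
        omega
    · rintro ⟨-, hcnt⟩
      intro s hs
      exact_mod_cast hcnt s

-- ===== VERDICT (by name: the statement is the Claim_ definition above) =====
theorem handleBeforeOperator_spec : Claim_equal_handleBeforeOperator := by
  intro bp ap queue _
  show handleBeforeOperator bp ap queue = handleBeforeOperator_alt bp ap queue
  have hA := pvGoA_char ap queue bp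
  have hB := alt_char bp ap queue
  unfold handleBeforeOperator
  cases hA' : pvGoA ap bp queue
  · cases hB' : handleBeforeOperator_alt bp ap queue
    · rfl
    · rw [hA'] at hA
      exact absurd (hA.mpr (hB.mp hB')) (by simp)
  · exact (hB.mpr (hA.mp hA')).symm
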